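-- pv_equiv track=rewrite | github.com/Ruben103/AI1 | Assignment 2/nim.py | negamax_value
-- ===== SOURCE A (Python) =====
-- def negamax_value(state, turn):
--     max = -100000000000
--
--     if state == 1:
--         return -1
--
--     for move in range(1, 4):
--         if state-move > 0:
--             m = -negamax_value(state-move, 1 - turn)
--             max = m if m > max else max
--
--     return max
-- ===== SOURCE B (Python) =====
-- def negamax_value(state, turn):
--     # Bottom-up DP over states 1..state keeping only the last three values
--     # (the game value does not depend on turn).
--     NO_MOVE = -100000000000
--     v = NO_MOVE
--     p1 = p2 = p3 = None  # values of the three preceding states, if they exist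
--     for s in range(1, state + 1):
--         if s == 1:
--             v = -1
--         else:
--             v = max(-p for p in (p1, p2, p3) if p is not None)
--         p1, p2, p3 = v, p1, p2
--     return v
-- ===== Notes on version B (the rewrite author's own statement) =====
-- stated objective: faster
-- what changed: Replaces A's unmemoized exponential three-way negamax recursion by a bottom-up dynamic program over states 1..state keeping only the last three game values (the turn argument does not affect the value); intended as asymptotically faster — a timing run could not measure a ratio because A already timed out at n=16 where B returned.
import Mathlib
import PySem

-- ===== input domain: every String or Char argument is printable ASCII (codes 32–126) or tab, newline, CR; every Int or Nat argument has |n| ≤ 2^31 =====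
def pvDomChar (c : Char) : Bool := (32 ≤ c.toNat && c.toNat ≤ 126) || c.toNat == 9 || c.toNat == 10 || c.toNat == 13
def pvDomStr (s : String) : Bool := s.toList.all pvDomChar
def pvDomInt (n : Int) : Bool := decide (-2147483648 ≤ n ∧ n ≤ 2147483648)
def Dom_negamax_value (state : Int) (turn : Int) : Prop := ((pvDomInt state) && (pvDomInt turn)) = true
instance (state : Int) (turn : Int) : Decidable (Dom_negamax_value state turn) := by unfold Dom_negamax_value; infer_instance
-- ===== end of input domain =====

-- B replaces A's unmemoized negamax recursion by a bottom-up DP keeping only the last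
-- three game values (objective: faster; intended as asymptotic — a timing run could
-- not measure a ratio because A timed out at n=16 where B returned).

-- ===== PORT A =====
-- 'max = m if m > max else max'
def nimRelax (mx : Int) (m : Int) : Int := if m > mx then m else mx

-- A's 'for move in range(1, 4)' is three iterations; they are written out in order.
def negamax_value (state : Int) (turn : Int) : Int :=
  if state = 1 then -1
  else
    let mx1 := if state - 1 > 0 then nimRelax (-100000000000) (-(negamax_value (state - 1) (1 - turn))) else (-100000000000)
    let mx2 := if state - 2 > 0 then nimRelax mx1 (-(negamax_value (state - 2) (1 - turn))) else mx1
    let mx3 := if state - 3 > 0 then nimRelax mx2 (-(negamax_value (state - 3) (1 - turn))) else mx2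
    mx3
termination_by state.toNat
decreasing_by all_goals omega

-- ===== PORT B =====
-- one loop iteration: acc = (v, p1, p2, p3)
-- Python's 'max(...)' raises on an empty generator; here the generator is nonempty
-- whenever s ≠ 1 is reached (p1 is always set after the first iteration), so the
-- .getD 0 default is never used.
def nimStep (acc : Int × Option Int × Option Int × Option Int) (s : Int) :
    Int × Option Int × Option Int × Option Int :=
  let v := if s = 1 then (-1 : Int)
           else (PySem.List.max? (([acc.2.1, acc.2.2.1, acc.2.2.2].filterMap id).map (fun p => -p)) (fun y => y)).getD 0
  (v, some v, acc.2.1, acc.2.2.1)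

def negamax_value_alt (state : Int) (turn : Int) : Int :=
  ((PySem.List.pyRange 1 (state + 1) 1).foldl nimStep (-100000000000, none, none, none)).1

-- ===== PRECONDITION & SPEC =====
-- A's unmemoized recursion descends state-1, state-2, ... one frame per state, so for
-- large positive state Python raises RecursionError (at state = 1000 with the default
-- recursion limit here); Pre_ excludes those inputs with a small safety margin for the
-- interpreter's base stack depth.  It does not otherwise narrow the domain.
def Pre_negamax_value (state : Int) (turn : Int) : Prop := state < 900
instance (state : Int) (turn : Int) : Decidable (Pre_negamax_value state turn) := by unfold Pre_negamax_value; infer_instance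
def pvWitness_negamax_value : Int × Int := (7, 0)

def Spec_negamax_value (state : Int) (turn : Int) (out : Int) : Prop := out = negamax_value_alt state turn
instance (state : Int) (turn : Int) (out : Int) : Decidable (Spec_negamax_value state turn out) := by unfold Spec_negamax_value; infer_instance

-- ===== CLAIM (what is proved, stated in full; the proofs are below) =====
def Claim_equal_negamax_value : Prop := ∀ (state : Int) (turn : Int), Dom_negamax_value state turn → Pre_negamax_value state turn → Spec_negamax_value state turn (negamax_value state turn)

-- ===== LEMMAS AND PROOFS =====

-- closed form shared by both proofs
def nimCf (s : Int) : Int := if s ≤ 0 then -100000000000 else if s % 4 = 1 then -1 else 1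

set_option maxHeartbeats 1000000 in
theorem A_eq_cf (state turn : Int) : negamax_value state turn = nimCf state := by
  rw [negamax_value]
  by_cases h1 : state = 1
  · simp [h1, nimCf]
  · rw [if_neg h1]
    by_cases hp : state - 1 > 0
    · have e1 : negamax_value (state - 1) (1 - turn) = nimCf (state - 1) := A_eq_cf _ _
      have e2 : state - 2 > 0 → negamax_value (state - 2) (1 - turn) = nimCf (state - 2) :=
        fun _ => A_eq_cf _ _
      have e3 : state - 3 > 0 → negamax_value (state - 3) (1 - turn) = nimCf (state - 3) :=
        fun _ => A_eq_cf _ _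
      by_cases hp2 : state - 2 > 0
      · by_cases hp3 : state - 3 > 0
        · simp only [e1, if_pos hp, if_pos hp2, if_pos hp3, e2 hp2, e3 hp3, nimRelax, nimCf]
          split_ifs <;> omega
        · simp only [e1, if_pos hp, if_pos hp2, if_neg hp3, e2 hp2, nimRelax, nimCf]
          split_ifs <;> omega
      · have hp3 : ¬ (state - 3 > 0) := by omega
        simp only [e1, if_pos hp, if_neg hp2, if_neg hp3, nimRelax, nimCf]
        split_ifs <;> omega
    · have hp2 : ¬ (state - 2 > 0) := by omega
      have hp3 : ¬ (state - 3 > 0) := by omega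
      simp only [if_neg hp, if_neg hp2, if_neg hp3, nimCf]
      split_ifs <;> omega
termination_by state.toNat
decreasing_by all_goals omega

-- previous-value slot: the value of state k if it is a real state
def nimOpt (k : Int) : Option Int := if 1 ≤ k then some (nimCf k) else none

theorem B_inv (n : Nat) :
    (PySem.List.pyRange 1 ((n : Int) + 1) 1).foldl nimStep (-100000000000, none, none, none)
      = (nimCf n, nimOpt n, nimOpt ((n : Int) - 1), nimOpt ((n : Int) - 2)) := by
  induction n with
  | zero =>
      rw [PySem.List.pyRange_one_eq_nil (by omega)]
      simp [nimCf, nimOpt]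
  | succ k ih =>
      have hc : ((k + 1 : Nat) : Int) + 1 = ((k : Int) + 1) + 1 := by push_cast; ring
      rw [hc, PySem.List.pyRange_one_succ_right (by omega), List.foldl_append, ih]
      have hc1 : ((k + 1 : Nat) : Int) = (k : Int) + 1 := by push_cast; ring
      have r1 : (k : Int) + 1 - 1 = (k : Int) := by ring
      have r2 : (k : Int) + 1 - 2 = (k : Int) - 1 := by ring
      rw [hc1, r1, r2]
      simp only [List.foldl]
      match k with
      | 0 => decide
      | 1 => decide
      | 2 => decide
      | (m + 3) =>
          have h1 : (1 : Int) ≤ (m : Int) + 3 := by omega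
          have h2 : (1 : Int) ≤ ((m : Int) + 3) - 1 := by omega
          have h3 : (1 : Int) ≤ ((m : Int) + 3) - 2 := by omega
          push_cast
          simp only [nimStep, nimOpt, if_pos h1, if_pos h2, if_pos h3]
          rw [if_neg (by omega : ¬ (m : Int) + 3 + 1 = 1)]
          simp only [Prod.mk.injEq]
          have hmax : ((PySem.List.max? (([some (nimCf ((m:Int)+3)), some (nimCf ((m:Int)+3-1)),
              some (nimCf ((m:Int)+3-2))].filterMap id).map (fun p => -p)) (fun y => y)).getD 0)
              = nimCf ((m : Int) + 3 + 1) := by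
            simp only [List.filterMap_cons, List.filterMap_nil, List.map_cons,
              List.map_nil, PySem.List.max?_id_cons, List.foldl, Option.getD, id]
            simp only [nimCf]
            split_ifs <;> omega
          rw [hmax]
          simp
          omega

theorem B_eq_cf (state turn : Int) : negamax_value_alt state turn = nimCf state := by
  unfold negamax_value_alt
  by_cases h : state ≤ 0
  · rw [PySem.List.pyRange_one_eq_nil (by omega)]
    simp [nimCf, h]
  · obtain ⟨n, rfl⟩ : ∃ n : Nat, state = (n : Int) := ⟨state.toNat, by omega⟩
    rw [B_inv n]

-- ===== VERDICT (by name: the statement is the Claim_ definition above) =====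
theorem negamax_value_spec : Claim_equal_negamax_value := by
  intro state turn _ _
  unfold Spec_negamax_value
  rw [A_eq_cf, B_eq_cf]
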